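-- pv_equiv track=rewrite | github.com/OGMaRs/ICS-33 | q3helper/q3solution.py | in_a_row
-- ===== SOURCE A (Python) =====
-- def in_a_row(n,iterable):
--     nextLet = iter(iterable)
--     toReturn = set()
--     counter = 1
--     if n < 2:
--         raise AssertionError("Length of iterable is not greater than 2")
--     letter = nextLet.__next__()
--     while True:
--         try:
--             if counter == n:
--                 toReturn.add(letter)
--             x = nextLet.__next__()
--             if letter == x:
--                 counter += 1
--             elif letter != x:
--                 letter = x
--                 counter = 1
--         except:
--             break
--     return toReturn
-- ===== SOURCE B (Python) =====
-- def in_a_row(n, iterable):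
--     if n < 2:
--         raise AssertionError("Length of iterable is not greater than 2")
--     items = list(iterable)
--     result = set()
--     i = 0
--     while i < len(items):
--         j = i
--         while j < len(items) and items[j] == items[i]:
--             j += 1
--         if j - i >= n:
--             result.add(items[i])
--         i = j
--     return result
-- ===== Notes on version B (the rewrite author's own statement) =====
-- stated objective: idiomatic
-- what changed: A walks an iterator element by element maintaining a current letter and a counter that triggers an add exactly when it hits n; B splits the list into maximal runs (inner scan finds each run's end) and adds the run's element when the run length is at least n.
import Mathlib
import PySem

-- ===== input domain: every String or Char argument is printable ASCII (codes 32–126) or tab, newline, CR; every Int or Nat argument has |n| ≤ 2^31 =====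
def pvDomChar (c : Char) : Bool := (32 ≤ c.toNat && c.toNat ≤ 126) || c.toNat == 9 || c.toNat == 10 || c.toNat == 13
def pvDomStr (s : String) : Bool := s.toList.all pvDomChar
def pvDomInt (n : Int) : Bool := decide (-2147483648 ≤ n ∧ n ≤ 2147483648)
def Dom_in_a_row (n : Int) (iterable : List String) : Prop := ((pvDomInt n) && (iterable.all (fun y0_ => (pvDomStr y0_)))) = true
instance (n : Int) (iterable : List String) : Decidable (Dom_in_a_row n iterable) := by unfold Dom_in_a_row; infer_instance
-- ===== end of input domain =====

-- B replaces A's letter/counter single-element walk by an explicit split into maximal runs (idiomatic run-length scan); same cost.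
-- Equivalence is about the return value; A raises on n < 2 and on an empty iterable (excluded by Pre_).

-- ===== PORT A =====
-- A's while-True loop: state = (remaining iterator, current letter, counter, result set);
-- the 'counter == n' add happens at the top of each iteration, then next() (StopIteration breaks).
def inARowLoopA (n : Int) (rest : List String) (letter : String) (counter : Int)
    (toReturn : PySem.Set String) : PySem.Set String :=
  let toReturn := if counter == n then PySem.Set.add toReturn letter else toReturn
  match rest with
  | [] => toReturn          -- next() raises StopIteration, bare except breaks
  | x :: xs =>
    if letter == x then inARowLoopA n xs letter (counter + 1) toReturn
    else inARowLoopA n xs x 1 toReturn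

def in_a_row (n : Int) (iterable : List String) : List String :=
  if n < 2 then []          -- AssertionError: outside Pre_
  else
    match iterable with
    | [] => []              -- StopIteration on the first next(): outside Pre_
    | letter :: rest => inARowLoopA n rest letter 1 PySem.Set.empty

-- ===== PORT B =====
-- B's outer while loop: split off the maximal run at the front (the inner j-scan = takeWhile/dropWhile),
-- add its element when the run length reaches n, continue after the run.
def inARowRunsB (n : Int) (items : List String) (result : PySem.Set String) : PySem.Set String :=
  match items with
  | [] => result
  | x :: xs =>
    let runLen : Int := (xs.takeWhile (fun y => x == y)).length + 1
    let result := if n ≤ runLen then PySem.Set.add result x else result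
    inARowRunsB n (xs.dropWhile (fun y => x == y)) result
termination_by items.length
decreasing_by
  simpa using Nat.lt_succ_of_le (List.length_dropWhile_le _ _)

def in_a_row_alt (n : Int) (iterable : List String) : List String :=
  if n < 2 then []          -- AssertionError: outside Pre_
  else inARowRunsB n iterable PySem.Set.empty

-- ===== PRECONDITION & SPEC =====
-- A raises AssertionError when n < 2 and StopIteration when the iterable is empty; Pre_ excludes exactly these.
def Pre_in_a_row (n : Int) (iterable : List String) : Prop := 2 ≤ n ∧ iterable ≠ []
instance (n : Int) (iterable : List String) : Decidable (Pre_in_a_row n iterable) := by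
  unfold Pre_in_a_row; infer_instance
def pvWitness_in_a_row : Int × List String := (2, ["a", "a", "b"])

def Spec_in_a_row (n : Int) (iterable : List String) (out : List String) : Prop := out = in_a_row_alt n iterable
instance (n : Int) (iterable : List String) (out : List String) : Decidable (Spec_in_a_row n iterable out) := by unfold Spec_in_a_row; infer_instance

-- ===== CLAIM (what is proved, stated in full; the proofs are below) =====
def Claim_equal_in_a_row : Prop := ∀ (n : Int) (iterable : List String), Dom_in_a_row n iterable → Pre_in_a_row n iterable → Spec_in_a_row n iterable (in_a_row n iterable)
-- ===== LEMMAS AND PROOFS =====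

-- Continuation after one maximal run: stop if nothing is left, else restart A's loop on the next run.
def inARowCont (n : Int) (d : List String) (a : PySem.Set String) : PySem.Set String :=
  match d with
  | [] => a
  | y :: ys => inARowLoopA n ys y 1 a

-- Processing one maximal run of `letter`: A's counter walk from counter c over xs performs one add
-- (iff the counter hits n inside the run) and then restarts after the run.
theorem inARowLoopA_run (n : Int) (letter : String) :
    ∀ (xs : List String) (c : Int) (acc : PySem.Set String),
      inARowLoopA n xs letter c acc =
        inARowCont n (xs.dropWhile (fun y => letter == y))
          (if c ≤ n ∧ n ≤ c + ((xs.takeWhile (fun y => letter == y)).length : Int) then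
             PySem.Set.add acc letter else acc) := by
  intro xs
  induction xs with
  | nil =>
    intro c acc
    simp only [inARowLoopA, List.takeWhile_nil, List.dropWhile_nil, List.length_nil,
      inARowCont, beq_iff_eq, Nat.cast_zero]
    split_ifs <;> first | rfl | omega
  | cons x xs ih =>
    intro c acc
    by_cases hx : (letter == x) = true
    · simp only [inARowLoopA, hx, if_true, List.takeWhile_cons_of_pos hx,
        List.dropWhile_cons_of_pos hx, List.length_cons, beq_iff_eq, Nat.cast_add, Nat.cast_one]
      rw [ih (c + 1)]
      congr 1
      have hee : List.takeWhile (BEq.beq letter) xs = List.takeWhile (fun y => letter == y) xs := rfl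
      rw [hee]
      split_ifs <;> first | rfl | omega
    · simp only [inARowLoopA, hx, List.takeWhile_cons_of_neg hx,
        List.dropWhile_cons_of_neg hx, List.length_nil, inARowCont,
        beq_iff_eq, Nat.cast_zero]
      split_ifs <;> first | rfl | omega | exact (‹False›).elim

-- A's loop from a fresh letter with counter 1 is exactly B's run recursion on letter :: xs.
theorem loopA_eq_runsB (n : Int) (hn : 2 ≤ n) :
    ∀ (xs : List String) (letter : String) (acc : PySem.Set String),
      inARowLoopA n xs letter 1 acc = inARowRunsB n (letter :: xs) acc := by
  intro xs letter acc
  induction hm : xs.length using Nat.strong_induction_on generalizing xs letter acc with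
  | _ m ih =>
    subst hm
    rw [inARowLoopA_run]
    simp only [inARowRunsB]
    have hcond : (1 ≤ n ∧ n ≤ 1 + ((xs.takeWhile (fun y => letter == y) ).length : Int)) ↔
        (n ≤ ((xs.takeWhile (fun y => letter == y)).length : Int) + 1) := by omega
    rcases hd : xs.dropWhile (fun y => letter == y) with _ | ⟨y, ys⟩
    · simp only [inARowCont, inARowRunsB]
      by_cases h : n ≤ ((xs.takeWhile (fun y => letter == y)).length : Int) + 1
      · rw [if_pos (hcond.mpr h), if_pos h]
      · rw [if_neg (fun hx => h (hcond.mp hx)), if_neg h]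
    · have hlt : ys.length < xs.length := by
        have := List.length_dropWhile_le (fun y => letter == y) xs
        rw [hd] at this; simp at this; omega
      simp only [inARowCont]
      rw [ih ys.length hlt ys y _ rfl]
      by_cases h : n ≤ ((xs.takeWhile (fun y => letter == y)).length : Int) + 1
      · rw [if_pos (hcond.mpr h), if_pos h]
      · rw [if_neg (fun hx => h (hcond.mp hx)), if_neg h]

-- ===== VERDICT (by name: the statement is the Claim_ definition above) =====
theorem in_a_row_spec : Claim_equal_in_a_row := by
  intro n iterable _ hpre
  obtain ⟨hn, hne⟩ := hpre
  unfold Spec_in_a_row in_a_row in_a_row_alt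
  match iterable, hne with
  | x :: xs, _ =>
    rw [if_neg (by omega), if_neg (by omega)]
    exact loopA_eq_runsB n hn xs x PySem.Set.empty
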